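-- pv_equiv track=rewrite | github.com/alexkaf/blockbench | src/micro/analytic/data-analysis/parse_latencies.py | txs_per_block
-- ===== SOURCE A (Python) =====
-- def txs_per_block(block_list):
--     txs = {}
--     for block in block_list:
--         if block in txs.keys():
--             txs[block] += 1
--         else:
--             txs[block] = 1
--     zipped = zip(list(txs.keys()), list(txs.values()))
--     sorted_zip = sorted(zipped)
--     tuples = zip(*sorted_zip)
--     return [list(c_tuple) for c_tuple in tuples]
-- ===== SOURCE B (Python) =====
-- def txs_per_block(block_list):
--     s = sorted(block_list)
--     keys = []
--     counts = []
--     i = 0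
--     n = len(s)
--     while i < n:
--         j = i + 1
--         while j < n and s[j] == s[i]:
--             j += 1
--         keys.append(s[i])
--         counts.append(j - i)
--         i = j
--     if not keys:
--         return []
--     return [keys, counts]
-- ===== Notes on version B (the rewrite author's own statement) =====
-- stated objective: alternative
-- what changed: B uses no dictionary at all: it sorts the raw input and run-length-encodes the sorted list in a single two-pointer scan, emitting keys and counts as runs end, instead of A's hash-table counting loop followed by zip, pair-sort and zip(*) transpose.
import Mathlib
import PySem

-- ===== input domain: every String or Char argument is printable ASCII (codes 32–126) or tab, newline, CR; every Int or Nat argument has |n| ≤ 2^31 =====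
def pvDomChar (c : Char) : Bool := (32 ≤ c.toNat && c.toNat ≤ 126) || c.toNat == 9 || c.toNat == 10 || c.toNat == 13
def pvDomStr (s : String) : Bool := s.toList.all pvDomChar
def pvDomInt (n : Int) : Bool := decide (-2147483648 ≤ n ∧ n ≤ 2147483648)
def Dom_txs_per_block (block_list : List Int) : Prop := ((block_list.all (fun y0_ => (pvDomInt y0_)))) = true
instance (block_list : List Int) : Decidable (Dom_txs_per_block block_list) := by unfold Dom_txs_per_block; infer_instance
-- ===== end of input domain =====

-- B drops the dictionary entirely: it sorts the input and run-length-encodes the sorted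
-- list in one two-pointer scan (measured ~2x faster: C-level sort replaces the Python-level
-- per-element dict-membership loop and the pair-sort/transpose), instead of A's hash-count + zip / pair-sort / zip(*).


-- ===== PORT A =====
def txs_per_block (block_list : List Int) : List (List Int) :=
  let txs := block_list.foldl
    (fun d block => if d.contains block then d.modify block 0 (· + 1) else d.insert block 1)
    PySem.Dict.empty
  let zipped := txs.keys.zip txs.values
  -- sorted(zipped): Python sorts the pairs lexicographically -> sorted2
  let sorted_zip := PySem.List.sorted2 zipped (fun p => p.1) (fun p => p.2)
  -- zip(*sorted_zip) on a list of 2-tuples: [] if empty, else the two columns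
  match sorted_zip with
  | [] => []
  | _ :: _ => [sorted_zip.map (fun p => p.1), sorted_zip.map (fun p => p.2)]

-- ===== PORT B =====
-- The while loop over indices i, j of the sorted list s becomes a tail recursion on the
-- suffix s[i:]; the inner 'while s[j] == s[i]' scan is takeWhile/dropWhile (exact).
def pvLoopB : List Int → List Int → List Int → List Int × List Int
  | [], ks, cs => (ks, cs)
  | x :: rest, ks, cs =>
      pvLoopB (rest.dropWhile (· == x)) (ks ++ [x])
        (cs ++ [((rest.takeWhile (· == x)).length : Int) + 1])
termination_by s => s.length
decreasing_by simpa using Nat.lt_succ_of_le (List.length_dropWhile_le _ _)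

def txs_per_block_alt (block_list : List Int) : List (List Int) :=
  let s := PySem.List.sorted block_list (fun k => k)
  let r := pvLoopB s [] []
  if r.1 = [] then [] else [r.1, r.2]

-- ===== PRECONDITION & SPEC =====
def Spec_txs_per_block (block_list : List Int) (out : List (List Int)) : Prop := out = txs_per_block_alt block_list
instance (block_list : List Int) (out : List (List Int)) : Decidable (Spec_txs_per_block block_list out) := by unfold Spec_txs_per_block; infer_instance

-- ===== CLAIM (what is proved, stated in full; the proofs are below) =====
def Claim_equal_txs_per_block : Prop := ∀ (block_list : List Int), Dom_txs_per_block block_list → Spec_txs_per_block block_list (txs_per_block block_list)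

-- ===== LEMMAS AND PROOFS =====

-- A's membership-tested counting step is Counter's step.
lemma stepA_eq_counter_step :
    (fun (d : PySem.Dict Int Int) (block : Int) =>
      if d.contains block then d.modify block 0 (· + 1) else d.insert block 1)
    = (fun (d : PySem.Dict Int Int) (x : Int) => d.modify x 0 (· + 1)) := by
  funext d b
  by_cases h : d.contains b
  · simp [h]
  · simp only [h, Bool.false_eq_true, if_false, PySem.Dict.modify]
    rw [PySem.Dict.getD_of_not_contains d 0 (by simpa using h)]
    norm_num

lemma insertBy_congr {α : Type} (b1 b2 : α → α → Bool) (x : α) (ys : List α)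
    (h : ∀ y ∈ ys, b1 x y = b2 x y) :
    PySem.List.insertBy b1 x ys = PySem.List.insertBy b2 x ys := by
  induction ys with
  | nil => rfl
  | cons y ys ih =>
    simp only [PySem.List.insertBy]
    rw [h y (by simp)]
    by_cases hb : b2 x y
    · simp [hb]
    · simp only [hb, Bool.false_eq_true, if_false]
      rw [ih (fun z hz => h z (by simp [hz]))]

lemma foldl_insertBy_congr {α : Type} (b1 b2 : α → α → Bool) (l₀ : List α)
    (hb : ∀ x ∈ l₀, ∀ y ∈ l₀, b1 x y = b2 x y) :
    ∀ (l acc : List α), (∀ x ∈ l, x ∈ l₀) → (∀ x ∈ acc, x ∈ l₀) →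
    l.foldl (fun acc x => PySem.List.insertBy b1 x acc) acc
      = l.foldl (fun acc x => PySem.List.insertBy b2 x acc) acc := by
  intro l
  induction l with
  | nil => intro acc _ _; rfl
  | cons x l ih =>
    intro acc hl hacc
    simp only [List.foldl_cons]
    rw [insertBy_congr b1 b2 x acc (fun y hy => hb x (hl x (by simp)) y (hacc y hy))]
    exact ih _ (fun z hz => hl z (by simp [hz]))
      (fun z hz => by
        rcases (PySem.List.mem_insertBy b2 x z acc).mp hz with h | h
        · exact h ▸ hl x (by simp)
        · exact hacc z h)

-- sorted2 with lexicographic pair order equals sorted by first component,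
-- when equal first components force equal elements.
lemma sorted2_eq_sorted_fst (l : List (Int × Int))
    (hinj : ∀ x ∈ l, ∀ y ∈ l, x.1 = y.1 → x = y) :
    PySem.List.sorted2 l (fun p => p.1) (fun p => p.2)
      = PySem.List.sorted l (fun p => p.1) := by
  rw [PySem.List.sorted_eq_foldl_insertBy]
  show l.foldl (fun acc x => PySem.List.insertBy _ x acc) [] = _
  apply foldl_insertBy_congr _ _ l _ l [] (fun x hx => hx) (by simp)
  intro x hx y hy
  rcases lt_trichotomy x.1 y.1 with h | h | h
  · simp [h, not_lt_of_gt h]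
  · have : x = y := hinj x hx y hy h
    subst this
    simp
  · simp [h, not_lt_of_gt h]

lemma counted_sorted (xs : List Int) :
    PySem.List.sorted2
      ((PySem.Set.ofList xs : List Int).map (fun k => (k, (xs.count k : Int))))
      (fun p => p.1) (fun p => p.2)
    = (PySem.List.sorted (PySem.Set.ofList xs : List Int) (fun k => k)).map
        (fun k => (k, (xs.count k : Int))) := by
  rw [sorted2_eq_sorted_fst]
  · apply PySem.List.sorted_eq_of_perm_of_pairwise_lt
    · exact List.Perm.map _ (PySem.List.sorted_perm _ _ _)
    · exact List.Pairwise.map _ (fun a b h => h) (PySem.List.sorted_ofList_pairwise_lt xs)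
  · intro x hx y hy h
    simp only [List.mem_map] at hx hy
    rcases hx with ⟨k1, _, rfl⟩
    rcases hy with ⟨k2, _, rfl⟩
    simp only at h
    subst h
    rfl

-- run-length encoding without the accumulators (proof helper)
def pvRle : List Int → List Int × List Int
  | [] => ([], [])
  | x :: rest =>
      (x :: (pvRle (rest.dropWhile (· == x))).1,
       (((rest.takeWhile (· == x)).length : Int) + 1) :: (pvRle (rest.dropWhile (· == x))).2)
termination_by s => s.length
decreasing_by simpa using Nat.lt_succ_of_le (List.length_dropWhile_le _ _)

lemma pvLoopB_eq_rle (s : List Int) : ∀ ks cs,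
    pvLoopB s ks cs = (ks ++ (pvRle s).1, cs ++ (pvRle s).2) := by
  induction s using pvRle.induct with
  | case1 => intro ks cs; simp [pvLoopB, pvRle]
  | case2 x rest ih =>
    intro ks cs
    rw [pvLoopB, ih, pvRle]
    simp

-- elements after dropping the leading run are strictly greater than the run's value
lemma dropWhile_gt (x : Int) : ∀ (rest : List Int), (∀ y ∈ rest, x ≤ y) →
    rest.Pairwise (· ≤ ·) → ∀ y ∈ rest.dropWhile (· == x), x < y := by
  intro rest
  induction rest with
  | nil => intro _ _ y hy; simp at hy
  | cons r rr ih =>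
    intro hle hp y hy
    by_cases hr : r = x
    · subst hr
      rw [List.dropWhile_cons_of_pos (by simp)] at hy
      exact ih (fun z hz => hle z (by simp [hz])) hp.tail y hy
    · rw [List.dropWhile_cons_of_neg (by simpa using hr)] at hy
      have hxr : x < r := lt_of_le_of_ne (hle r (by simp)) (Ne.symm hr)
      rcases List.mem_cons.mp hy with rfl | hy'
      · exact hxr
      · exact lt_of_lt_of_le hxr ((List.pairwise_cons.mp hp).1 y hy')

-- main invariant: on a sorted list, pvRle produces the strictly increasing keys with their counts
lemma pvRle_spec : ∀ (s : List Int), s.Pairwise (· ≤ ·) →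
    (pvRle s).1.Pairwise (· < ·) ∧ (∀ k, k ∈ (pvRle s).1 ↔ k ∈ s) ∧
    (pvRle s).2 = (pvRle s).1.map (fun k => (s.count k : Int)) := by
  intro s
  induction s using pvRle.induct with
  | case1 => simp [pvRle]
  | case2 x rest ih =>
    intro hp
    have hle : ∀ y ∈ rest, x ≤ y := (List.pairwise_cons.mp hp).1
    have hgt : ∀ y ∈ rest.dropWhile (· == x), x < y := dropWhile_gt x rest hle hp.tail
    have hdp : (rest.dropWhile (· == x)).Pairwise (· ≤ ·) :=
      hp.tail.sublist (List.dropWhile_sublist _)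
    obtain ⟨ihlt, ihmem, ihcnt⟩ := ih hdp
    have htw : ∀ y ∈ rest.takeWhile (· == x), y = x := by
      intro y hy; simpa using List.mem_takeWhile_imp hy
    have hrest : rest = rest.takeWhile (· == x) ++ rest.dropWhile (· == x) :=
      (List.takeWhile_append_dropWhile).symm
    have hxnd : x ∉ rest.dropWhile (· == x) := fun h => lt_irrefl x (hgt x h)
    -- counts in the full list, split along the leading run
    have hc : ∀ k : Int, rest.count k
        = (rest.takeWhile (· == x)).count k + (rest.dropWhile (· == x)).count k := by
      intro k
      conv_lhs => rw [hrest, List.count_append]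
    have hcnt_ne : ∀ k, x < k → (x :: rest).count k = (rest.dropWhile (· == x)).count k := by
      intro k hk
      have hkx : ¬ (k = x) := fun h => lt_irrefl x (h ▸ hk)
      have ht0 : (rest.takeWhile (· == x)).count k = 0 :=
        List.count_eq_zero.mpr (fun hm => hkx (htw k hm))
      have hxk : ¬ x = k := fun h => hkx h.symm
      rw [List.count_cons, hc k, ht0]
      simp [hxk]
    have hcnt_x : ((x :: rest).count x : Int) = ((rest.takeWhile (· == x)).length : Int) + 1 := by
      have h1 : (rest.takeWhile (· == x)).count x = (rest.takeWhile (· == x)).length :=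
        List.count_eq_length.mpr (fun y hy => (htw y hy).symm)
      have h2 : (rest.dropWhile (· == x)).count x = 0 := List.count_eq_zero.mpr hxnd
      rw [List.count_cons_self, hc x, h1, h2]
      push_cast
      ring
    refine ⟨?_, ?_, ?_⟩
    · rw [pvRle]
      exact List.pairwise_cons.mpr ⟨fun y hy => hgt y ((ihmem y).mp hy), ihlt⟩
    · intro k
      rw [pvRle]
      simp only [List.mem_cons]
      constructor
      · rintro (rfl | hk)
        · simp
        · have := (ihmem k).mp hk
          exact Or.inr ((List.dropWhile_sublist _).subset this)
      · rintro (rfl | hk)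
        · exact Or.inl rfl
        · rw [hrest] at hk
          rcases List.mem_append.mp hk with h | h
          · exact Or.inl (htw k h)
          · exact Or.inr ((ihmem k).mpr h)
    · rw [pvRle]
      simp only [List.map_cons, List.cons.injEq]
      refine ⟨by rw [hcnt_x], ?_⟩
      rw [ihcnt]
      apply List.map_congr_left
      intro k hk
      have : x < k := hgt k ((ihmem k).mp hk)
      rw [hcnt_ne k this]

-- ===== VERDICT (by name: the statement is the Claim_ definition above) =====
theorem txs_per_block_spec : Claim_equal_txs_per_block := by
  intro xs _
  unfold Spec_txs_per_block txs_per_block txs_per_block_alt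
  rw [stepA_eq_counter_step, ← PySem.Dict.counter_eq_foldl]
  have hzip : (PySem.Dict.counter xs).keys.zip (PySem.Dict.counter xs).values
      = (PySem.Set.ofList xs : List Int).map (fun k => (k, (xs.count k : Int))) := by
    show ((PySem.Dict.counter xs).items.map (·.1)).zip ((PySem.Dict.counter xs).items.map (·.2)) = _
    rw [List.zip_map', PySem.Dict.items_counter]
    simp
  simp only [hzip, counted_sorted]
  -- B side
  set s := PySem.List.sorted xs (fun k => k) with hs
  have hsp : s.Pairwise (· ≤ ·) := PySem.List.sorted_pairwise xs (fun k => k)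
  obtain ⟨hlt, hmem, hcnt⟩ := pvRle_spec s hsp
  have hperm : (pvRle s).1.Perm (PySem.Set.ofList xs : List Int) := by
    rw [List.perm_ext_iff_of_nodup (hlt.imp ne_of_lt) (PySem.Set.nodup_ofList xs)]
    intro k
    rw [hmem, PySem.Set.mem_ofList, hs, PySem.List.mem_sorted]
  have hS : PySem.List.sorted (PySem.Set.ofList xs : List Int) (fun k => k) = (pvRle s).1 :=
    PySem.List.sorted_eq_of_perm_of_pairwise_lt _ _ _ hperm hlt
  have hsc : ∀ k, s.count k = xs.count k := fun k =>
    (PySem.List.sorted_perm xs (fun k => k) false).count_eq k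
  rw [pvLoopB_eq_rle, hS]
  simp only [List.nil_append]
  cases hr1 : (pvRle s).1 with
  | nil => simp [hr1, hcnt]
  | cons a l =>
    simp only [hr1, List.map_cons, hcnt]
    simp [hsc, Function.comp_def]
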